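-- pv_equiv track=rewrite | github.com/kj-1729/OpenCV | PerspectiveTransform/make_tracking_video.py | reverse_coordinate
-- ===== SOURCE A (Python) =====
-- def reverse_coordinate(direction, this_list, max_len):
--   new_list = []
--   if direction == 'x':
--     resid = 0
--   else:
--     resid = 1
--
--   for item in this_list:
--     new_item = []
--     for loop in range(len(item)):
--       if loop % 2 == resid:
--         new_item.append(max_len - item[loop])
--       else:
--         new_item.append(item[loop])
--     new_list.append(new_item)
--
--   return new_list
-- ===== SOURCE B (Python) =====
-- def reverse_coordinate(direction, this_list, max_len):
--     resid = 0 if direction == 'x' else 1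
--
--     def flip(item):
--         new_item = list(item)
--         new_item[resid::2] = [max_len - v for v in item[resid::2]]
--         return new_item
--
--     return [flip(item) for item in this_list]
-- ===== Notes on version B (the rewrite author's own statement) =====
-- stated objective: idiomatic
-- what changed: Replaces the index loop with a per-index parity test by a strided slice read/assignment (item[resid::2]) over a copied list, removing the inner branch; the outer loop becomes a comprehension.
import Mathlib
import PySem

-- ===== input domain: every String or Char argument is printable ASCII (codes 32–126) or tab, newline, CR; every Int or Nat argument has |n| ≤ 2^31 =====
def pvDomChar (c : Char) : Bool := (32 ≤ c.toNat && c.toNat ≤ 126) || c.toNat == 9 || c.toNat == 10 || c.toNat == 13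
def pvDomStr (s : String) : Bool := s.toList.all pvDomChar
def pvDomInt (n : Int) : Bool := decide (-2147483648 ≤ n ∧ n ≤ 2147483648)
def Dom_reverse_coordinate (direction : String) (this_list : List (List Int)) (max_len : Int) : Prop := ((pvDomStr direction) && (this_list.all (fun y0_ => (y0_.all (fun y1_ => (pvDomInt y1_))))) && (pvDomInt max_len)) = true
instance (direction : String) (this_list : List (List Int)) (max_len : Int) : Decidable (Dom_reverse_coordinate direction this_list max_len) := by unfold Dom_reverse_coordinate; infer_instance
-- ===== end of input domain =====

-- B copies each item and overwrites the strided slice [resid::2] with the flipped values; same outputs, no inner parity branch.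

-- ===== PORT A =====
def reverse_coordinate (direction : String) (this_list : List (List Int)) (max_len : Int) : List (List Int) :=
  let resid : Nat := if direction = "x" then 0 else 1
  this_list.foldl (fun new_list item =>
    new_list ++ [(List.range item.length).foldl (fun new_item loop =>
      new_item ++ [if loop % 2 = resid then max_len - item.getD loop 0 else item.getD loop 0]) []]) []

-- ===== PORT B =====
-- hand-port of the step-2 slice read item[resid::2] (exact for a nonnegative start and step 2):
def pvStride2 : List Int → List Int
  | [] => []
  | [a] => [a]
  | a :: _ :: t => a :: pvStride2 t

-- hand-port of the step-2 slice assignment new_item[resid::2] = repl on a copy of item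
-- (exact when repl has the slice's length, which Python requires; p counts down to the next written index)
def pvAssign2 : List Int → Nat → List Int → List Int
  | [], _, _ => []
  | _ :: t, 0, r :: rs => r :: pvAssign2 t 1 rs
  | a :: t, 0, [] => a :: pvAssign2 t 1 []
  | a :: t, _ + 1, repl => a :: pvAssign2 t 0 repl

def reverse_coordinate_alt (direction : String) (this_list : List (List Int)) (max_len : Int) : List (List Int) :=
  let resid : Nat := if direction = "x" then 0 else 1
  this_list.map (fun item =>
    pvAssign2 item resid ((pvStride2 (item.drop resid)).map (fun v => max_len - v)))

-- ===== PRECONDITION & SPEC =====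
def Spec_reverse_coordinate (direction : String) (this_list : List (List Int)) (max_len : Int) (out : List (List Int)) : Prop := out = reverse_coordinate_alt direction this_list max_len
instance (direction : String) (this_list : List (List Int)) (max_len : Int) (out : List (List Int)) : Decidable (Spec_reverse_coordinate direction this_list max_len out) := by unfold Spec_reverse_coordinate; infer_instance

-- ===== CLAIM (what is proved, stated in full; the proofs are below) =====
def Claim_equal_reverse_coordinate : Prop := ∀ (direction : String) (this_list : List (List Int)) (max_len : Int), Dom_reverse_coordinate direction this_list max_len → Spec_reverse_coordinate direction this_list max_len (reverse_coordinate direction this_list max_len)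

-- ===== LEMMAS AND PROOFS =====

theorem foldl_append_singleton {α β : Type} (l : List α) (g : α → β) (init : List β) :
    l.foldl (fun acc x => acc ++ [g x]) init = init ++ l.map g := by
  induction l generalizing init with
  | nil => simp
  | cons a t ih => simp [List.foldl, ih, List.append_assoc]

-- the common middle form: flip exactly the indices of parity p
def pvFlipIdx (f : Int → Int) (p : Nat) (item : List Int) : List Int :=
  item.mapIdx (fun i v => if i % 2 = p then f v else v)

theorem pvFlipIdx_cons (f : Int → Int) (p : Nat) (hp : p ≤ 1) (a : Int) (t : List Int) :
    pvFlipIdx f p (a :: t) = (if 0 % 2 = p then f a else a) :: pvFlipIdx f (1 - p) t := by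
  simp only [pvFlipIdx, List.mapIdx_cons]
  congr 1
  rw [List.mapIdx_eq_mapIdx_iff]
  intro i hi
  interval_cases p <;> simp <;> omega

theorem pvAssign2_eq_flipIdx (f : Int → Int) (item : List Int) :
    (pvAssign2 item 0 ((pvStride2 item).map f) = pvFlipIdx f 0 item) ∧
    (pvAssign2 item 1 ((pvStride2 (item.drop 1)).map f) = pvFlipIdx f 1 item) := by
  induction item with
  | nil => simp [pvAssign2, pvFlipIdx]
  | cons a t ih =>
    constructor
    · have hs : pvStride2 (a :: t) = a :: pvStride2 (t.drop 1) := by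
        cases t <;> simp [pvStride2]
      rw [hs, List.map_cons]
      simp only [pvAssign2]
      rw [pvFlipIdx_cons f 0 (by omega)]
      simpa using ih.2
    · simp only [List.drop_one, List.tail_cons, pvAssign2]
      rw [pvFlipIdx_cons f 1 (by omega)]
      simp [ih.1]

theorem range_map_eq_flipIdx (f : Int → Int) (p : Nat) (item : List Int) :
    (List.range item.length).map
      (fun loop => if loop % 2 = p then f (item.getD loop 0) else item.getD loop 0)
    = pvFlipIdx f p item := by
  apply List.ext_getElem
  · simp [pvFlipIdx]
  · intro i h1 h2
    have hi : i < item.length := by simpa [pvFlipIdx] using h2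
    simp [pvFlipIdx, List.getElem?_eq_getElem hi]

-- ===== VERDICT (by name: the statement is the Claim_ definition above) =====
theorem reverse_coordinate_spec : Claim_equal_reverse_coordinate := by
  intro direction this_list max_len _
  unfold Spec_reverse_coordinate reverse_coordinate reverse_coordinate_alt
  simp only []
  set resid : Nat := if direction = "x" then 0 else 1 with hresid
  rw [foldl_append_singleton, List.nil_append]
  apply List.map_congr_left
  intro item _
  rw [foldl_append_singleton, List.nil_append]
  have hcase : resid = 0 ∨ resid = 1 := by
    rw [hresid]; split <;> simp
  rcases hcase with h | h <;> rw [h]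
  · rw [range_map_eq_flipIdx (fun v => max_len - v) 0 item,
      ← (pvAssign2_eq_flipIdx (fun v => max_len - v) item).1]
    simp
  · rw [range_map_eq_flipIdx (fun v => max_len - v) 1 item,
      ← (pvAssign2_eq_flipIdx (fun v => max_len - v) item).2]
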